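-- pv_equiv track=rewrite | github.com/yusurko/suou | src/suou/bits.py | mask_shift
-- ===== SOURCE A (Python) =====
-- def mask_shift(n: int, mask: int) -> int:
--     '''
--     Select the bits from n chosen by mask, least significant first.
--     '''
--     if mask == 0:
--         return 0
--     elif mask == -1:
--         return n
--     else:
--         i = 0
--         while mask & (1 << i) == 0:
--             i += 1
--         n >>= i
--         mask >>= i
--         o = 0
--         while mask & (1 << o) == 1:
--             o += 1
--         return (n & ((1 << o) - 1)) | (mask_shift(n >> o, mask >> o) << o)
-- ===== SOURCE B (Python) =====
-- def mask_shift(n: int, mask: int) -> int: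
--     '''
--     Select the bits from n chosen by mask, least significant first.
--     '''
--     result = 0
--     pos = 0
--     while mask != 0 and mask != -1:
--         if mask & 1:
--             result |= (n & 1) << pos
--             pos += 1
--         n >>= 1
--         mask >>= 1
--     if mask == -1:
--         result |= n << pos
--     return result
-- ===== Notes on version B (the rewrite author's own statement) =====
-- stated objective: simpler
-- what changed: Replaces A's per-set-bit recursion (which rescans from bit 0 for the next set mask bit at every level and reassembles the result with shifted ORs up the call chain) by a single non-recursive loop that walks the mask one bit at a time, ORing selected bits of n into an accumulator, with one final append of the remaining n when the arithmetic shift of a negative mask reaches -1.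
import Mathlib
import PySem

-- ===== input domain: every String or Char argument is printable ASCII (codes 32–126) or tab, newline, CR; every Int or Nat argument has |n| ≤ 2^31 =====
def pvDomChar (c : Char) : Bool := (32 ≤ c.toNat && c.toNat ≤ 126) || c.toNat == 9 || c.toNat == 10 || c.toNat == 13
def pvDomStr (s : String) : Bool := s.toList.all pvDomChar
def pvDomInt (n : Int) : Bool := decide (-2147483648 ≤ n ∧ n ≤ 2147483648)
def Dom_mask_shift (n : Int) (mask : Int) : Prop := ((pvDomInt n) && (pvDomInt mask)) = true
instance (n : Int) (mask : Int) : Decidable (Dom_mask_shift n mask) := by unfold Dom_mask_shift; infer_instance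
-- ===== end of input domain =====

-- B replaces A's per-set-bit recursion by a single iterative pass over the mask bits; equal return values are proved.

-- ===== PORT A =====
-- `while mask & (1 << i) == 0: i += 1`  (the fuel argument is only a totality guard; proved sufficient below)
def pvFindI (mask : Int) (i : Nat) : Nat → Nat
  | 0 => i
  | fuel+1 => if PySem.Int.band mask ((1:Int) <<< i) = 0 then pvFindI mask (i+1) fuel else i

-- `while mask & (1 << o) == 1: o += 1`
def pvFindO (mask : Int) (o : Nat) : Nat → Nat
  | 0 => o
  | fuel+1 => if PySem.Int.band mask ((1:Int) <<< o) = 1 then pvFindO mask (o+1) fuel else o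

-- the recursion of A, with a fuel counter as totality guard (proved sufficient below)
def pvGoA (n mask : Int) : Nat → Int
  | 0 => 0
  | fuel+1 =>
    if mask = 0 then 0
    else if mask = -1 then n
    else
      let i := pvFindI mask 0 (mask.natAbs + 1)
      let n1 := n >>> i
      let m1 := mask >>> i
      let o := pvFindO m1 0 (m1.natAbs + 1)
      PySem.Int.bor (PySem.Int.band n1 (((1:Int) <<< o) - 1)) (pvGoA (n1 >>> o) (m1 >>> o) fuel <<< o)

def mask_shift (n : Int) (mask : Int) : Int := pvGoA n mask (2*mask+1).natAbs

-- ===== PORT B =====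
-- the while loop of B, with a fuel counter as totality guard (proved sufficient below)
def pvGoB (n mask result : Int) (pos : Nat) : Nat → Int
  | 0 => if mask = -1 then PySem.Int.bor result (n <<< pos) else result
  | fuel+1 =>
    if mask ≠ 0 ∧ mask ≠ -1 then
      if PySem.Int.band mask 1 ≠ 0 then
        pvGoB (n >>> (1:Nat)) (mask >>> (1:Nat))
          (PySem.Int.bor result (PySem.Int.band n 1 <<< pos)) (pos+1) fuel
      else
        pvGoB (n >>> (1:Nat)) (mask >>> (1:Nat)) result pos fuel
    else if mask = -1 then PySem.Int.bor result (n <<< pos) else result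

def mask_shift_alt (n : Int) (mask : Int) : Int := pvGoB n mask 0 0 (2*mask+1).natAbs

-- ===== PRECONDITION & SPEC =====
def Spec_mask_shift (n : Int) (mask : Int) (out : Int) : Prop := out = mask_shift_alt n mask
instance (n : Int) (mask : Int) (out : Int) : Decidable (Spec_mask_shift n mask out) := by unfold Spec_mask_shift; infer_instance

-- ===== CLAIM (what is proved, stated in full; the proofs are below) =====
def Claim_equal_mask_shift : Prop := ∀ (n : Int) (mask : Int), Dom_mask_shift n mask → Spec_mask_shift n mask (mask_shift n mask)

-- ===== LEMMAS AND PROOFS =====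

-- bit-level decomposition of Nat's &&& / ||| into the low bit and the upper half
theorem pvNatAnd (x y : Nat) : x &&& y = 2*((x/2) &&& (y/2)) + (x%2)*(y%2) := by
  have h2 : (x &&& y) / 2 = x/2 &&& y/2 := Nat.and_div_two
  have key : ((x &&& y) % 2 = 1) ↔ (x % 2 = 1 ∧ y % 2 = 1) := by
    simpa using Nat.testBit_and x y 0
  have h0 : (x &&& y) % 2 = (x%2)*(y%2) := by
    rcases Nat.mod_two_eq_zero_or_one x with h | h <;>
      rcases Nat.mod_two_eq_zero_or_one y with h' | h' <;> rw [h, h'] <;> omega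
  omega

theorem pvNatOr (x y : Nat) : x ||| y = 2*((x/2) ||| (y/2)) + (x%2 + y%2 - (x%2)*(y%2)) := by
  have h2 : (x ||| y) / 2 = x/2 ||| y/2 := Nat.or_div_two
  have key : ((x ||| y) % 2 = 1) ↔ (x % 2 = 1 ∨ y % 2 = 1) := by
    simpa using Nat.testBit_or x y 0
  have h0 : (x ||| y) % 2 = x%2 + y%2 - (x%2)*(y%2) := by
    rcases Nat.mod_two_eq_zero_or_one x with h | h <;>
      rcases Nat.mod_two_eq_zero_or_one y with h' | h' <;> rw [h, h'] <;> omega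
  omega

-- Python's % 2 is Int's emod 2
theorem pvMod2 (a : Int) : PySem.Int.mod a 2 = a % 2 := by
  simp [PySem.Int.mod, Int.fmod_eq_emod_of_nonneg]

theorem pvBand1 (a : Int) : PySem.Int.band a 1 = a % 2 := by
  rw [PySem.Int.band_one, pvMod2]

-- halving identities for two's-complement band/bor
theorem pvBandEven (a : Int) (m : Nat) : PySem.Int.band a (2*(m:Int)) = 2 * PySem.Int.band (a/2) (m:Int) := by
  simp only [PySem.Int.band]
  split_ifs with h1 h2 h3 <;> try omega
  · rw [show ((2*(m:Int)).toNat) = 2*m from by omega,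
        show ((a/2).toNat) = a.toNat/2 from by omega,
        show (((m:Int)).toNat) = m from by omega]
    have h := pvNatAnd a.toNat (2*m)
    rw [show (2*m/2) = m from by omega, show (2*m%2) = 0 from by omega] at h
    omega
  · rw [show ((2*(m:Int)).toNat) = 2*m from by omega,
        show ((-(a/2)-1).toNat) = (-a-1).toNat/2 from by omega,
        show (((m:Int)).toNat) = m from by omega]
    have h := pvNatAnd (2*m) (-a-1).toNat
    rw [show (2*m/2) = m from by omega, show (2*m%2) = 0 from by omega] at h
    have hb : m &&& (-a-1).toNat/2 ≤ m := Nat.and_le_left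
    omega

theorem pvBorEven (a b : Int) : PySem.Int.bor a (2*b) = 2 * PySem.Int.bor (a/2) b + a%2 := by
  simp only [PySem.Int.bor]
  split_ifs with h1 h2 h3 h4 h5 h6 h7 h8 h9 <;> try omega
  · rw [show ((2*b).toNat) = 2*b.toNat from by omega,
        show ((a/2).toNat) = a.toNat/2 from by omega]
    have h := pvNatOr a.toNat (2*b.toNat)
    rw [show (2*b.toNat/2) = b.toNat from by omega, show (2*b.toNat%2) = 0 from by omega] at h
    omega
  · rw [show ((-(2*b)-1).toNat) = 2*(-b-1).toNat+1 from by omega,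
        show ((a/2).toNat) = a.toNat/2 from by omega]
    have h := pvNatAnd (2*(-b-1).toNat+1) a.toNat
    rw [show ((2*(-b-1).toNat+1)/2) = (-b-1).toNat from by omega,
        show ((2*(-b-1).toNat+1)%2) = 1 from by omega] at h
    have hb : (-b-1).toNat &&& a.toNat/2 ≤ (-b-1).toNat := Nat.and_le_left
    omega
  · rw [show ((2*b).toNat) = 2*b.toNat from by omega,
        show ((-(a/2)-1).toNat) = (-a-1).toNat/2 from by omega]
    have h := pvNatAnd (-a-1).toNat (2*b.toNat)
    rw [show (2*b.toNat/2) = b.toNat from by omega, show (2*b.toNat%2) = 0 from by omega] at h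
    have hb : (-a-1).toNat/2 &&& b.toNat ≤ (-a-1).toNat/2 := Nat.and_le_left
    omega
  · rw [show ((-(2*b)-1).toNat) = 2*(-b-1).toNat+1 from by omega,
        show ((-(a/2)-1).toNat) = (-a-1).toNat/2 from by omega]
    have h := pvNatAnd (-a-1).toNat (2*(-b-1).toNat+1)
    rw [show ((2*(-b-1).toNat+1)/2) = (-b-1).toNat from by omega,
        show ((2*(-b-1).toNat+1)%2) = 1 from by omega] at h
    omega

-- band with a power of two isolates one bit
theorem pvBandPow (i : Nat) (a : Int) : PySem.Int.band a ((1:Int) <<< i) = (a / 2^i % 2) * 2^i := by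
  induction i generalizing a with
  | zero => simpa using pvBand1 a
  | succ i ih =>
    have e : ((1:Int) <<< (i+1)) = 2*((2^i : Nat) : Int) := by
      rw [Int.shiftLeft_eq]; push_cast; ring
    rw [e, pvBandEven]
    have e2 : ((2^i : Nat) : Int) = (1:Int) <<< i := by rw [Int.shiftLeft_eq]; push_cast; ring
    rw [e2, ih]
    rw [Int.ediv_ediv_of_nonneg (by positivity : (0:Int) ≤ 2),
       show (2:Int)*2^i = 2^(i+1) from by ring]
    ring

theorem pvBandPowZero (i : Nat) (a : Int) :
    (PySem.Int.band a ((1:Int) <<< i) = 0) ↔ a / 2^i % 2 = 0 := by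
  rw [pvBandPow]
  have hp : (0:Int) < 2^i := by positivity
  have := Int.emod_two_eq (a / 2^i)
  constructor
  · intro h
    rcases this with h' | h'
    · exact h'
    · rw [h'] at h; omega
  · intro h; rw [h]; ring

-- bitwise-or of disjoint parts is addition
theorem pvBorDisj (p : Nat) (r m : Int) (h0 : 0 ≤ r) (h1 : r < 2^p) :
    PySem.Int.bor r (m <<< p) = r + m * 2^p := by
  induction p generalizing r with
  | zero =>
    have : r = 0 := by omega
    subst this
    rw [PySem.Int.bor_comm, PySem.Int.bor_zero, Int.shiftLeft_eq]
    ring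
  | succ p ih =>
    have e : (m <<< (p+1) : Int) = 2*(m <<< p) := by
      rw [Int.shiftLeft_eq, Int.shiftLeft_eq]; ring
    rw [e, pvBorEven, ih (r/2) (by omega) (by omega)]
    have hm : m * 2^(p+1) = 2*(m*2^p) := by ring
    omega

-- arithmetic shift right is floor division by a power of two
theorem pvShR (a : Int) (k : Nat) : a >>> k = a / 2^k := by
  simp [Int.shiftRight_eq_div_pow]

theorem pvShR1 (a : Int) : a >>> (1:Nat) = a / 2 := by
  rw [pvShR, pow_one]

-- the common specification: one PEXT step per mask bit (well-founded on the mask)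
def pvPext (n mask : Int) : Int :=
  if mask = 0 then 0
  else if mask = -1 then n
  else if mask % 2 = 1 then n % 2 + 2 * pvPext (n/2) (mask/2)
  else pvPext (n/2) (mask/2)
termination_by (2*mask+1).natAbs
decreasing_by all_goals omega

theorem pvPext_odd (n mask : Int) (h : mask % 2 = 1) :
    pvPext n mask = n % 2 + 2 * pvPext (n/2) (mask/2) := by
  rw [pvPext]
  have h0 : mask ≠ 0 := by omega
  by_cases h1 : mask = -1
  · subst h1
    rw [pvPext]
    norm_num
    omega
  · simp [h0, h1, h]

theorem pvPext_even (n mask : Int) (h : mask % 2 = 0) (h0 : mask ≠ 0) :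
    pvPext n mask = pvPext (n/2) (mask/2) := by
  rw [pvPext]
  have h1 : mask ≠ -1 := by omega
  simp [h0, h1, h]

theorem pvPext_skip (i : Nat) (n mask : Int) (h0 : mask ≠ 0)
    (h : ∀ k < i, mask / 2^k % 2 = 0) :
    pvPext n mask = pvPext (n/2^i) (mask/2^i) := by
  induction i generalizing n mask with
  | zero => simp
  | succ i ih =>
    have he : mask % 2 = 0 := by simpa using h 0 (by omega)
    rw [pvPext_even n mask he h0]
    rw [ih (n/2) (mask/2) (by omega) ?_]
    · rw [Int.ediv_ediv_of_nonneg (by positivity : (0:Int) ≤ 2),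
          Int.ediv_ediv_of_nonneg (by positivity : (0:Int) ≤ 2),
          show (2:Int)*2^i = 2^(i+1) from by ring]
    · intro k hk
      rw [Int.ediv_ediv_of_nonneg (by positivity : (0:Int) ≤ 2),
          show (2:Int)*2^k = 2^(k+1) from by ring]
      exact h (k+1) (by omega)

-- fuel bookkeeping
theorem pvMuDivPowLe (x : Int) (k : Nat) : (2*(x/2^k)+1).natAbs ≤ (2*x+1).natAbs := by
  induction k generalizing x with
  | zero => simp
  | succ k ih =>
    have e : x/2^(k+1) = (x/2)/2^k := by
      rw [Int.ediv_ediv_of_nonneg (by positivity : (0:Int) ≤ 2),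
          show (2:Int)*2^k = 2^(k+1) from by ring]
    rw [e]
    calc (2*((x/2)/2^k)+1).natAbs ≤ (2*(x/2)+1).natAbs := ih (x/2)
      _ ≤ (2*x+1).natAbs := by omega

-- pvFindI finds the least set bit
theorem pvFindI_go (mask : Int) (fuel : Nat) : ∀ i j : Nat, i ≤ j → j ≤ i + fuel →
    mask / 2^j % 2 = 1 → (∀ k, i ≤ k → k < j → mask / 2^k % 2 = 0) →
    pvFindI mask i fuel = j := by
  induction fuel with
  | zero =>
    intro i j h1 h2 _ _
    have : i = j := by omega
    simp [pvFindI, this]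
  | succ fuel ih =>
    intro i j h1 h2 hodd hev
    rw [pvFindI]
    by_cases hc : PySem.Int.band mask ((1:Int) <<< i) = 0
    · rw [if_pos hc]
      have hij : i ≠ j := by
        intro e; subst e
        rw [(pvBandPowZero i mask).mp hc] at hodd; omega
      exact ih (i+1) j (by omega) (by omega) hodd (fun k hk1 hk2 => hev k (by omega) hk2)
    · rw [if_neg hc]
      by_cases hij : i = j
      · omega
      · exact absurd ((pvBandPowZero i mask).mpr (hev i le_rfl (by omega))) hc

theorem pvExistsOdd (mask : Int) (h : mask ≠ 0) : ∃ j, j ≤ mask.natAbs ∧ mask / 2^j % 2 = 1 := by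
  generalize hm : mask.natAbs = M
  induction M using Nat.strong_induction_on generalizing mask with
  | _ M ih =>
    rcases Int.emod_two_eq mask with he | he
    · have h2 : mask / 2 ≠ 0 := by omega
      have hlt : (mask/2).natAbs < M := by omega
      obtain ⟨j, hj1, hj2⟩ := ih (mask/2).natAbs hlt (mask/2) h2 rfl
      refine ⟨j+1, by omega, ?_⟩
      rw [show (2:Int)^(j+1) = 2*2^j from by ring,
          ← Int.ediv_ediv_of_nonneg (by positivity : (0:Int) ≤ 2)]
      exact hj2
    · exact ⟨0, by omega, by simpa using he⟩

-- on an odd mask A's inner `o` loop always stops at 1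
theorem pvFindO_one (m1 : Int) (h : m1 % 2 = 1) : pvFindO m1 0 (m1.natAbs + 1) = 1 := by
  have h0 : m1 ≠ 0 := by omega
  obtain ⟨k, hk⟩ : ∃ k, m1.natAbs + 1 = k + 2 := ⟨m1.natAbs - 1, by omega⟩
  rw [hk]
  rw [pvFindO, if_pos (by rw [pvBandPow]; simpa using h)]
  rw [pvFindO, if_neg ?_]
  rw [pvBandPow]
  have := Int.emod_two_eq (m1 / 2^1)
  have h2 : (2:Int)^1 = 2 := by norm_num
  rcases this with h' | h' <;> rw [h'] <;> norm_num

-- A computes pvPext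
theorem pvGoA_eq (fuel : Nat) : ∀ n mask : Int, (2*mask+1).natAbs ≤ fuel →
    pvGoA n mask fuel = pvPext n mask := by
  induction fuel with
  | zero => intro n mask hf; omega
  | succ fuel ih =>
    intro n mask hf
    rw [pvGoA]
    by_cases h0 : mask = 0
    · subst h0; rw [pvPext]; simp
    rw [if_neg h0]
    by_cases h1 : mask = -1
    · subst h1; rw [pvPext]; simp
    rw [if_neg h1]
    have hex : ∃ j, mask / 2^j % 2 = 1 := by
      obtain ⟨j, _, hj⟩ := pvExistsOdd mask h0; exact ⟨j, hj⟩
    let j₀ := Nat.find hex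
    have hodd : mask / 2^j₀ % 2 = 1 := Nat.find_spec hex
    have hmin : ∀ k < j₀, mask / 2^k % 2 = 0 := by
      intro k hk
      have := Nat.find_min hex hk
      have h2 := Int.emod_two_eq (mask / 2^k)
      omega
    have hle : j₀ ≤ mask.natAbs := by
      obtain ⟨j, hj1, hj2⟩ := pvExistsOdd mask h0
      exact le_trans (Nat.find_min' hex hj2) hj1
    have hi : pvFindI mask 0 (mask.natAbs + 1) = j₀ :=
      pvFindI_go mask _ 0 j₀ (by omega) (by omega) hodd (fun k _ hk => hmin k hk)
    have hm1 : mask >>> j₀ = mask / 2^j₀ := pvShR mask j₀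
    simp only [hi, hm1]
    rw [pvFindO_one _ hodd]
    rw [show ((1:Int) <<< (1:Nat)) - 1 = 1 from by decide]
    rw [pvBand1, pvShR1, pvShR1]
    have hcomm : mask / 2^j₀ / 2 = (mask / 2) / 2^j₀ := by
      rw [Int.ediv_ediv_of_nonneg (by positivity : (0:Int) ≤ 2^j₀),
          Int.ediv_ediv_of_nonneg (by positivity : (0:Int) ≤ 2), mul_comm]
    have hmu : (2*(mask / 2^j₀ / 2)+1).natAbs ≤ fuel := by
      rw [hcomm]
      have := pvMuDivPowLe (mask/2) j₀
      omega
    rw [ih (n >>> j₀ / 2) (mask / 2^j₀ / 2) hmu]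
    rw [pvBorDisj 1 _ _ (by omega) (by simpa using Int.emod_lt_of_pos (n >>> j₀) (by norm_num : (0:Int) < 2))]
    rw [pvPext_skip j₀ n mask h0 hmin, pvShR n j₀]
    rw [pvPext_odd _ _ hodd]
    ring

-- B computes pvPext
theorem pvGoB_eq (fuel : Nat) : ∀ (n mask result : Int) (pos : Nat), (2*mask+1).natAbs ≤ fuel →
    0 ≤ result → result < 2^pos → pvGoB n mask result pos fuel = result + pvPext n mask * 2^pos := by
  induction fuel with
  | zero => intro n mask result pos hf _ _; omega
  | succ fuel ih =>
    intro n mask result pos hf hr0 hr1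
    rw [pvGoB]
    by_cases h0 : mask = 0
    · subst h0
      rw [if_neg (by simp), if_neg (by norm_num), pvPext]
      simp
    by_cases h1 : mask = -1
    · subst h1
      rw [if_neg (by simp), if_pos rfl, pvPext]
      norm_num
      exact pvBorDisj pos result n hr0 hr1
    rw [if_pos ⟨h0, h1⟩]
    have hmu : (2*(mask/2)+1).natAbs ≤ fuel := by omega
    have hm2 := Int.emod_two_eq mask
    by_cases hodd : mask % 2 = 1
    · rw [if_pos (by rw [pvBand1]; omega)]
      rw [pvBand1, pvShR1, pvShR1]
      have hn2 : (0:Int) ≤ n % 2 ∧ n % 2 < 2 := ⟨Int.emod_nonneg n (by norm_num), Int.emod_lt_of_pos n (by norm_num)⟩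
      rw [pvBorDisj pos result (n % 2) hr0 hr1]
      have hp : (0:Int) < 2^pos := by positivity
      have hb0 : (0:Int) ≤ result + n % 2 * 2^pos :=
        add_nonneg hr0 (mul_nonneg hn2.1 hp.le)
      have hb1 : result + n % 2 * 2^pos < 2^(pos+1) := by
        have h2p : (2:Int)^(pos+1) = 2*2^pos := by ring
        nlinarith [hn2.1, hn2.2]
      rw [ih (n/2) (mask/2) _ (pos+1) hmu hb0 hb1]
      rw [pvPext_odd n mask hodd]
      ring
    · rw [if_neg (by rw [pvBand1]; omega)]
      rw [pvShR1, pvShR1]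
      rw [ih (n/2) (mask/2) result pos hmu hr0 hr1]
      rw [pvPext_even n mask (by omega) h0]

-- ===== VERDICT (by name: the statement is the Claim_ definition above) =====
theorem mask_shift_spec : Claim_equal_mask_shift := by
  intro n mask _
  unfold Spec_mask_shift mask_shift mask_shift_alt
  rw [pvGoA_eq _ n mask le_rfl, pvGoB_eq _ n mask 0 0 le_rfl le_rfl (by norm_num)]
  ring
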